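-- pv_equiv track=rewrite | github.com/MrBrantCode/unitest_baseline | mut_generate/mist_train_cf/cf_93971/solution.py | count_repeated_words
-- ===== SOURCE A (Python) =====
-- from collections import Counter
--
-- def count_repeated_words(sentence):
--     # Split the sentence into words
--     words = sentence.split()
--
--     # Exclude words containing the letter 'e' and are plural nouns
--     excluded_words = set()
--     for word in words:
--         if 'e' in word or word.endswith('s') or word.endswith('es'):
--             excluded_words.add(word)
--
--     # Count the repeated words
--     word_counts = Counter(word for word in words if word not in excluded_words)
--
--     # Filter out words that appear only once
--     repeated_words = {word: count for word, count in word_counts.items() if count > 1}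
--
--     return repeated_words
-- ===== SOURCE B (Python) =====
-- from collections import Counter
--
-- def count_repeated_words(sentence):
--     counts = Counter(sentence.split())
--     return {w: c for w, c in counts.items()
--             if c > 1 and 'e' not in w and not w.endswith('s')}
-- ===== Notes on version B (the rewrite author's own statement) =====
-- stated objective: simpler
-- what changed: B builds one Counter over all words and applies the exclusion predicate and the count>1 test in a single final comprehension, dropping A's separate excluded-words set pass and the intermediate filtered Counter; A's redundant two-letter suffix test is subsumed by its one-letter suffix test.
import Mathlib
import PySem

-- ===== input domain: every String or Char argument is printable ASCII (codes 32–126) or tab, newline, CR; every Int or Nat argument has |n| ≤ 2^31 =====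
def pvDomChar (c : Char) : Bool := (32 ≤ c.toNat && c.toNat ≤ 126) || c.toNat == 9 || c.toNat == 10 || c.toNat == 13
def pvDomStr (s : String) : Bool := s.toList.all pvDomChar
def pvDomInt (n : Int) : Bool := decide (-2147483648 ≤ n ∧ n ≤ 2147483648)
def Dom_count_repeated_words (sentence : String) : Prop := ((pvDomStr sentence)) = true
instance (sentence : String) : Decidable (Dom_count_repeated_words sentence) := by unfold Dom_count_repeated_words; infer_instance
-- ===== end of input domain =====

-- B builds one Counter over all words and filters once with the combined predicate (simpler decomposition; same complexity).

-- ===== PORT A =====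
def count_repeated_words (sentence : String) : List (String × Int) :=
  let words := PySem.Str.split₀ sentence
  let excluded_words : PySem.Set String :=
    words.foldl (fun s w =>
      if PySem.Str.isIn "e" w || PySem.Str.endswith w "s" || PySem.Str.endswith w "es"
      then PySem.Set.add s w else s) PySem.Set.empty
  let word_counts :=
    PySem.Dict.counter (words.filter (fun w => !(PySem.Set.contains excluded_words w)))
  word_counts.items.filter (fun p => decide (1 < p.2))

-- ===== PORT B =====
def count_repeated_words_alt (sentence : String) : List (String × Int) :=
  let counts := PySem.Dict.counter (PySem.Str.split₀ sentence)
  counts.items.filter (fun p =>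
    decide (1 < p.2) && !(PySem.Str.isIn "e" p.1) && !(PySem.Str.endswith p.1 "s"))

-- ===== PRECONDITION & SPEC =====
def Spec_count_repeated_words (sentence : String) (out : List (String × Int)) : Prop := out = count_repeated_words_alt sentence
instance (sentence : String) (out : List (String × Int)) : Decidable (Spec_count_repeated_words sentence out) := by unfold Spec_count_repeated_words; infer_instance

-- ===== CLAIM (what is proved, stated in full; the proofs are below) =====
def Claim_equal_count_repeated_words : Prop := ∀ (sentence : String), Dom_count_repeated_words sentence → Spec_count_repeated_words sentence (count_repeated_words sentence)

-- ===== LEMMAS AND PROOFS =====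

-- the exclusion predicate of A, as a function of the word alone
def pvBad (w : String) : Bool :=
  PySem.Str.isIn "e" w || PySem.Str.endswith w "s" || PySem.Str.endswith w "es"

lemma pv_es_imp_s (w : String) (h : PySem.Str.endswith w "es" = true) :
    PySem.Str.endswith w "s" = true := by
  rw [PySem.Str.endswith_eq] at *
  have hes : ("es" : String).toList = ['e', 's'] := rfl
  have hs : ("s" : String).toList = ['s'] := rfl
  rw [hes] at h; rw [hs]
  simp only [PySem.Chars.endswith] at *
  rw [List.isSuffixOf_iff_suffix] at *
  exact List.IsSuffix.trans ⟨['e'], rfl⟩ h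

lemma pv_keep_eq (w : String) :
    (!pvBad w) = (!(PySem.Str.isIn "e" w) && !(PySem.Str.endswith w "s")) := by
  unfold pvBad
  cases hes : PySem.Str.endswith w "es" with
  | true =>
    rw [pv_es_imp_s w hes]
    cases PySem.Str.isIn "e" w <;> rfl
  | false =>
    cases PySem.Str.isIn "e" w <;> cases PySem.Str.endswith w "s" <;> rfl

lemma pv_filter_add {p : String → Bool} (s : PySem.Set String) (x : String) :
    (PySem.Set.add s x).filter p = if p x then PySem.Set.add (s.filter p) x else s.filter p := by
  by_cases hc : x ∈ s
  · by_cases hp : p x = true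
    · simp [PySem.Set.add, hc, hp, List.mem_filter]
    · simp [PySem.Set.add, hc, hp]
  · by_cases hp : p x = true
    · simp [PySem.Set.add, hc, hp, List.mem_filter, List.filter_append]
    · simp [PySem.Set.add, hc, hp, List.filter_append]

lemma pv_foldl_add_filter (p : String → Bool) :
    ∀ (xs : List String) (acc : PySem.Set String),
      List.foldl PySem.Set.add (acc.filter p) (xs.filter p) =
        (List.foldl PySem.Set.add acc xs).filter p := by
  intro xs
  induction xs with
  | nil => intro acc; rfl
  | cons x xs ih =>
    intro acc
    by_cases hp : p x = true
    · simp only [List.filter_cons, hp, if_true, List.foldl_cons]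
      rw [← ih (PySem.Set.add acc x)]
      congr 1
      simp [pv_filter_add, hp]
    · simp only [List.filter_cons, hp, List.foldl_cons]
      rw [← ih (PySem.Set.add acc x)]
      congr 1
      simp [pv_filter_add, hp]

lemma pv_ofList_filter (p : String → Bool) (xs : List String) :
    PySem.Set.ofList (xs.filter p) = (PySem.Set.ofList xs).filter p := by
  rw [PySem.Set.ofList_eq_foldl, PySem.Set.ofList_eq_foldl]
  exact pv_foldl_add_filter p xs []

theorem pv_main (sentence : String) :
    count_repeated_words sentence = count_repeated_words_alt sentence := by
  simp only [count_repeated_words, count_repeated_words_alt]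
  set ws := PySem.Str.split₀ sentence with hws
  -- the excluded set is exactly set(filter bad ws)
  have hex : ws.foldl (fun s w => if pvBad w then PySem.Set.add s w else s) PySem.Set.empty
      = PySem.Set.ofList (ws.filter pvBad) := by
    rw [PySem.List.foldl_if_eq_foldl_filter pvBad PySem.Set.add ws PySem.Set.empty,
      show (PySem.Set.empty : PySem.Set String) = [] from rfl, ← PySem.Set.ofList_eq_foldl]
  have hcont : ∀ w ∈ ws,
      (!(PySem.Set.contains (PySem.Set.ofList (ws.filter pvBad)) w)) = !(pvBad w) := by
    intro w hw
    cases hb : pvBad w with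
    | true =>
      have : PySem.Set.contains (PySem.Set.ofList (ws.filter pvBad)) w = true :=
        (PySem.Set.contains_iff _ w).2
          ((PySem.Set.mem_ofList _ w).2 (List.mem_filter.2 ⟨hw, hb⟩))
      rw [this]
    | false =>
      have : PySem.Set.contains (PySem.Set.ofList (ws.filter pvBad)) w = false := by
        cases h : PySem.Set.contains (PySem.Set.ofList (ws.filter pvBad)) w
        · rfl
        · have := List.mem_filter.1
            ((PySem.Set.mem_ofList _ w).1 ((PySem.Set.contains_iff _ w).1 h))
          rw [this.2] at hb; exact absurd hb (by simp)
      rw [this]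
  show (PySem.Dict.counter (ws.filter (fun w => !(PySem.Set.contains
        (ws.foldl (fun s w => if PySem.Str.isIn "e" w || PySem.Str.endswith w "s" ||
          PySem.Str.endswith w "es" then PySem.Set.add s w else s) PySem.Set.empty) w)))).items.filter
        (fun p => decide (1 < p.2))
      = (PySem.Dict.counter ws).items.filter (fun p =>
          decide (1 < p.2) && !(PySem.Str.isIn "e" p.1) && !(PySem.Str.endswith p.1 "s"))
  have hbad : (fun s w => if PySem.Str.isIn "e" w || PySem.Str.endswith w "s" ||
      PySem.Str.endswith w "es" then PySem.Set.add s w else s)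
      = (fun s w => if pvBad w then PySem.Set.add s w else s) := rfl
  rw [hbad, hex, List.filter_congr hcont]
  -- both sides via items_counter
  rw [PySem.Dict.items_counter, PySem.Dict.items_counter]
  set keep : String → Bool := fun w => !(pvBad w) with hkeep
  -- counts inside the filtered list equal counts in ws, for kept words
  have hcnt : ∀ k ∈ PySem.Set.ofList (ws.filter keep),
      ((k, (List.count k (ws.filter keep) : Int)) : String × Int)
        = (k, (List.count k ws : Int)) := by
    intro k hk
    have hkk : keep k = true :=
      (List.mem_filter.1 ((PySem.Set.mem_ofList _ k).1 hk)).2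
    rw [List.count_filter hkk]
  rw [List.map_congr_left hcnt, pv_ofList_filter keep ws]
  rw [List.filter_map, List.filter_map, List.filter_filter]
  congr 1
  apply List.filter_congr
  intro k _
  simp only [Function.comp]
  rw [hkeep]
  simp only []
  rw [pv_keep_eq k]
  cases decide (1 < (List.count k ws : Int)) <;>
    cases PySem.Str.isIn "e" k <;> cases PySem.Str.endswith k "s" <;> rfl

-- ===== VERDICT (by name: the statement is the Claim_ definition above) =====
theorem count_repeated_words_spec : Claim_equal_count_repeated_words := by
  intro sentence _
  unfold Spec_count_repeated_words
  exact pv_main sentence
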